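-- pv_equiv track=rewrite | github.com/Golovvvastik/crunch | tpass_beta_v2.py | if_registr
-- ===== SOURCE A (Python) =====
-- def if_registr(un):    # Смотрит на большие и маленькие символы, и ищет есть ли похожий, если нет, то добавляет
--
--     tmp_pop = list(range(len(un))) # длинна set(un), в листе от 0 до ...
--     tmp_list = list(un) # временный лист
--     end_list = tmp_list # конечный лист, на возврат
--
--     for i in tmp_pop:
--         tmp_register = str(tmp_list[i]) # временная буква из временного списка, для сравнения
--
--         if str.isupper(tmp_register) == True:      # Если буква из индекса [i] большая, то мы УМЕНЬШАЕМ и сравниваем со списком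
--             tmp_register_lower = tmp_register.lower()
--             count_lower = 0
--             for x_lower in tmp_list:
--                 if x_lower != tmp_register_lower:
--                     count_lower += 1
--                 if x_lower == tmp_register_lower:
--                     count_lower = 0
--                     continue
--             if count_lower == int(len(tmp_list)):
--                 end_list.append(tmp_register_lower)
--                 continue
--             else:
--                 continue
--
--         if str.islower(tmp_register) == True:      # Если буква из индекса [i] маленькая, то мы УВЕЛИЧИВАЕМ и сравниваем со списком
--             tmp_register_upper = tmp_register.upper()
--             count_upper = 0
--             for x_upper in tmp_list:
--                 if x_upper != tmp_register_upper:
--                     count_upper += 1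
--                 if x_upper == tmp_register_upper:
--                     count_upper = 0
--                     continue
--             if count_upper == int(len(tmp_list)):
--                 end_list.append(tmp_register_upper)
--                 continue
--             else:
--                 continue
--
--     return set(end_list)
-- ===== SOURCE B (Python) =====
-- def if_registr(un):
--     result = set(un)
--     for c in un:
--         s = str(c)
--         if s.isupper():
--             result.add(s.lower())
--         elif s.islower():
--             result.add(s.upper())
--     return result
-- ===== Notes on version B (the rewrite author's own statement) =====
-- stated objective: faster
-- what changed: Replaces A's index loop with per-element full-list counting scans over an aliased growing list (plus a final set() pass) by a single pass over the string that adds each opposite-case counterpart directly into a set, relying on set semantics for deduplication.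
import Mathlib
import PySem

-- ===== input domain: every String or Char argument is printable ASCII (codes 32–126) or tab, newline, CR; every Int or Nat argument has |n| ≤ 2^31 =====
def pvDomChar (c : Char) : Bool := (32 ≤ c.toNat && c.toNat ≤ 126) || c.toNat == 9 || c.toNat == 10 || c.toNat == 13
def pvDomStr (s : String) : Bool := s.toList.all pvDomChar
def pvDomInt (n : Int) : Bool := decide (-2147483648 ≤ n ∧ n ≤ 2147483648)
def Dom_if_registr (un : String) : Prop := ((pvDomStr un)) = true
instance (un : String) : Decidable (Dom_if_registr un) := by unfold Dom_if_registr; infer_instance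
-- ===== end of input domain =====

-- B replaces A's index loop with per-element counting scans over the (aliased, growing) list
-- by a single pass over the string that adds each opposite-case counterpart into a set; same return value.

-- Shared helper: Python str.isupper()/str.islower() (at least one cased character, and every
-- cased character upper/lower); exact on ASCII, ported by hand over the char predicates.
def pvStrIsupper (s : String) : Bool :=
  s.toList.any PySem.Chars.isalpha && s.toList.all (fun c => !(PySem.Chars.islower c))

def pvStrIslower (s : String) : Bool :=
  s.toList.any PySem.Chars.isalpha && s.toList.all (fun c => !(PySem.Chars.isupper c))

-- ===== PORT A =====
-- end_list ALIASES tmp_list in the Python, so appends are seen by later iterations: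
-- one list state `tl` plays both roles. Every index i the loop reaches is < tl.length
-- (the list only grows past its original length), so pyGetD with a dummy default is exact here.
-- Loop body of A's `for i in tmp_pop`, as a named helper:
def pvStepA (tl : List String) (i : Int) : List String :=
  let tmp_register : String := PySem.List.pyGetD tl i ""
  if pvStrIsupper tmp_register then
    let tmp_register_lower := PySem.Str.lower tmp_register
    let count_lower : Int := tl.foldl (fun c x => if x = tmp_register_lower then 0 else c + 1) 0
    if count_lower = (tl.length : Int) then tl ++ [tmp_register_lower] else tl
  else if pvStrIslower tmp_register then
    let tmp_register_upper := PySem.Str.upper tmp_register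
    let count_upper : Int := tl.foldl (fun c x => if x = tmp_register_upper then 0 else c + 1) 0
    if count_upper = (tl.length : Int) then tl ++ [tmp_register_upper] else tl
  else tl

def if_registr (un : String) : List String :=
  let tmp_list : List String := un.toList.map (fun c => String.ofList [c])
  let tmp_pop : List Int := PySem.List.pyRange 0 (tmp_list.length : Int) 1
  PySem.Set.ofList (tmp_pop.foldl pvStepA tmp_list)

-- ===== PORT B =====
-- Loop body of B's `for c in un` (applied to s = str(c)), as a named helper:
def pvStepB (result : PySem.Set String) (s : String) : PySem.Set String :=
  if pvStrIsupper s then PySem.Set.add result (PySem.Str.lower s)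
  else if pvStrIslower s then PySem.Set.add result (PySem.Str.upper s)
  else result

def if_registr_alt (un : String) : List String :=
  un.toList.foldl (fun result c => pvStepB result (String.ofList [c]))
    (PySem.Set.ofList (un.toList.map (fun c => String.ofList [c])))

-- ===== PRECONDITION & SPEC =====
def Spec_if_registr (un : String) (out : List String) : Prop := out = if_registr_alt un
instance (un : String) (out : List String) : Decidable (Spec_if_registr un out) := by unfold Spec_if_registr; infer_instance

-- ===== CLAIM (what is proved, stated in full; the proofs are below) =====
def Claim_equal_if_registr : Prop := ∀ (un : String), Dom_if_registr un → Spec_if_registr un (if_registr un)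

-- ===== LEMMAS AND PROOFS =====

-- A's inner counting loop: the count is bounded by start + length
lemma pv_cnt_le (t : String) (tl : List String) : ∀ a : Int, 0 ≤ a →
    tl.foldl (fun c x => if x = t then 0 else c + 1) a ≤ a + tl.length := by
  induction tl with
  | nil => intro a _; simp
  | cons y ys ih =>
    intro a ha
    rw [List.foldl_cons]
    by_cases h : y = t
    · rw [if_pos h]
      have := ih 0 (le_refl 0)
      simp only [List.length_cons]
      push_cast
      omega
    · rw [if_neg h]
      have := ih (a + 1) (by omega)
      simp only [List.length_cons]
      push_cast
      omega

lemma pv_cnt_of_not_mem (t : String) (tl : List String) (h : t ∉ tl) : ∀ a : Int,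
    tl.foldl (fun c x => if x = t then 0 else c + 1) a = a + tl.length := by
  induction tl with
  | nil => intro a; simp
  | cons y ys ih =>
    intro a
    have hy : ¬ (y = t) := fun e => h (by simp [e])
    rw [List.foldl_cons, if_neg hy]
    rw [ih (fun hm => h (List.mem_cons_of_mem _ hm)) (a + 1)]
    simp only [List.length_cons]; push_cast; ring

lemma pv_cnt_of_mem (t : String) (tl : List String) (h : t ∈ tl) : ∀ a : Int, 0 ≤ a →
    tl.foldl (fun c x => if x = t then 0 else c + 1) a < tl.length := by
  induction tl with
  | nil => exact absurd h (List.not_mem_nil)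
  | cons y ys ih =>
    intro a ha
    rw [List.foldl_cons]
    by_cases hy : y = t
    · rw [if_pos hy]
      have := pv_cnt_le t ys 0 (le_refl 0)
      simp only [List.length_cons]
      push_cast
      omega
    · rw [if_neg hy]
      have hm : t ∈ ys := by
        rcases List.mem_cons.mp h with e | hm
        · exact absurd e.symm hy
        · exact hm
      have := ih hm (a + 1) (by omega)
      simp only [List.length_cons]
      push_cast
      omega

-- the count equals the length exactly when the target is absent
lemma pv_cnt_eq_iff (t : String) (tl : List String) :
    (tl.foldl (fun c x => if x = t then 0 else c + 1) (0 : Int) = (tl.length : Int)) ↔ t ∉ tl := by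
  constructor
  · intro he hm
    have := pv_cnt_of_mem t tl hm 0 (le_refl 0)
    omega
  · intro hn
    have := pv_cnt_of_not_mem t tl hn 0
    omega

-- one A-step at an in-range index acts, on the set of the state, exactly like B's step on that element
lemma pv_step_set (l extra : List String) (k : Nat) (hk : k < l.length) :
    PySem.Set.ofList (pvStepA (l ++ extra) (k : Int))
      = pvStepB (PySem.Set.ofList (l ++ extra)) l[k] := by
  have hget : PySem.List.pyGetD (l ++ extra) (k : Int) "" = l[k] := by
    rw [PySem.List.pyGetD_natCast]
    rw [List.getD_eq_getElem?_getD, List.getElem?_append_left hk,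
      List.getElem?_eq_getElem hk, Option.getD_some]
  simp only [pvStepA, pvStepB, hget]
  by_cases h1 : pvStrIsupper l[k] = true
  · rw [if_pos h1, if_pos h1]
    by_cases hc : (l ++ extra).foldl
        (fun c x => if x = PySem.Str.lower l[k] then 0 else c + 1) (0 : Int)
        = ((l ++ extra).length : Int)
    · have hn := (pv_cnt_eq_iff _ (l ++ extra)).mp hc
      rw [if_pos hc, PySem.Set.ofList_append_singleton]
    · have hm : PySem.Str.lower l[k] ∈ l ++ extra := by
        by_contra hn
        exact hc (pv_cnt_of_not_mem _ (l ++ extra) hn 0 |>.trans (by simp))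
      rw [if_neg hc, PySem.Set.add_of_mem ((PySem.Set.mem_ofList _ _).mpr hm)]
  · rw [if_neg h1, if_neg h1]
    by_cases h2 : pvStrIslower l[k] = true
    · rw [if_pos h2, if_pos h2]
      by_cases hc : (l ++ extra).foldl
          (fun c x => if x = PySem.Str.upper l[k] then 0 else c + 1) (0 : Int)
          = ((l ++ extra).length : Int)
      · have hn := (pv_cnt_eq_iff _ (l ++ extra)).mp hc
        rw [if_pos hc, PySem.Set.ofList_append_singleton]
      · have hm : PySem.Str.upper l[k] ∈ l ++ extra := by
          by_contra hn
          exact hc (pv_cnt_of_not_mem _ (l ++ extra) hn 0 |>.trans (by simp))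
        rw [if_neg hc, PySem.Set.add_of_mem ((PySem.Set.mem_ofList _ _).mpr hm)]
    · rw [if_neg h2, if_neg h2]

-- an A-step only ever appends to its state
lemma pv_stepA_shape (tl : List String) (i : Int) :
    pvStepA tl i = tl ∨ ∃ x, pvStepA tl i = tl ++ [x] := by
  simp only [pvStepA]
  split_ifs <;> first | exact Or.inl rfl | exact Or.inr ⟨_, rfl⟩

-- main invariant: the set of A's final list state equals B's fold of the remaining elements
lemma pv_main (l : List String) : ∀ (n k : Nat) (extra : List String), l.length - k = n → k ≤ l.length →
    PySem.Set.ofList ((PySem.List.pyRange (k : Int) (l.length : Int) 1).foldl pvStepA (l ++ extra))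
      = (l.drop k).foldl pvStepB (PySem.Set.ofList (l ++ extra)) := by
  intro n
  induction n with
  | zero =>
    intro k extra hn hk
    have hk' : k = l.length := by omega
    subst hk'
    rw [PySem.List.pyRange_one_eq_nil (le_refl _), List.drop_length]
    simp
  | succ m ih =>
    intro k extra hn hk
    have hklt : k < l.length := by omega
    have hlt : (k : Int) < (l.length : Int) := by exact_mod_cast hklt
    rw [PySem.List.pyRange_one_cons hlt, List.foldl_cons]
    rw [List.drop_eq_getElem_cons hklt, List.foldl_cons]
    have h1 : ((k : Int) + 1) = ((k + 1 : Nat) : Int) := by push_cast; ring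
    rcases pv_stepA_shape (l ++ extra) (k : Int) with hs | ⟨x, hs⟩
    · rw [hs, h1, ih (k + 1) extra (by omega) (by omega)]
      rw [← pv_step_set l extra k hklt, hs]
    · have hs' : pvStepA (l ++ extra) (k : Int) = l ++ (extra ++ [x]) := by
        rw [hs, List.append_assoc]
      rw [hs', h1, ih (k + 1) (extra ++ [x]) (by omega) (by omega)]
      rw [← pv_step_set l extra k hklt, hs']

-- ===== VERDICT (by name: the statement is the Claim_ definition above) =====
theorem if_registr_spec : Claim_equal_if_registr := by
  intro un _
  unfold Spec_if_registr if_registr if_registr_alt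
  have h := pv_main (un.toList.map (fun c => String.ofList [c]))
      (un.toList.map (fun c => String.ofList [c])).length 0 [] (by omega) (by omega)
  simp only [List.append_nil, List.drop_zero, Nat.cast_zero] at h
  rw [h, List.foldl_map]
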